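-- pv_equiv track=rewrite | github.com/jax-ml/jax | jax/_src/pallas/einshape.py | _parse_side
-- ===== SOURCE A (Python) =====
-- def _parse_side(s: str) -> list[list[str]]:
--   """Parses one side of an einshape equation into groups of named dimensions.
--
--   Groups are indicated by parentheses. Dimensions outside of parentheses are
--   treated as groups of size 1.
--   For example:
--     "a(bc)d" -> [['a'], ['b', 'c'], ['d']]
--     "(ab)c" -> [['a', 'b'], ['c']]
--
--   Args:
--     s: One side of an einshape equation string.
--
--   Returns:
--     A list of lists of characters, where each inner list represents a group of
--     dimensions.
--   """
--   # Remove spaces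
--   s = s.replace(" ", "")
--   groups = []
--   i = 0
--   while i < len(s):
--     if s[i] == "(":
--       # Start of a group
--       j = s.find(")", i)
--       if j == -1:
--         raise ValueError(f"Unmatched parenthesis in {s!r}")
--       group = list(s[i + 1 : j])
--       groups.append(group)
--       i = j + 1
--     elif s[i] == ")":
--       raise ValueError(f"Unmatched parenthesis in {s!r}")
--     else:
--       # distinct dimension
--       groups.append([s[i]])
--       i += 1
--   return groups
-- ===== SOURCE B (Python) =====
-- def _parse_side(s: str) -> list[list[str]]:
--   """Single-pass state machine: `current` is None outside a group, the
--   group's chars while inside one."""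
--   groups = []
--   current = None
--   for c in s.replace(" ", ""):
--     if current is None:
--       if c == "(":
--         current = []
--       elif c == ")":
--         raise ValueError("Unmatched parenthesis")
--       else:
--         groups.append([c])
--     else:
--       if c == ")":
--         groups.append(current)
--         current = None
--       else:
--         current.append(c)
--   if current is not None:
--     raise ValueError("Unmatched parenthesis")
--   return groups
-- ===== Notes on version B (the rewrite author's own statement) =====
-- stated objective: alternative
-- what changed: Replaces the index loop with find()-based jumps to the next ')' by a single left-to-right character state machine holding the currently open group; both raise ValueError on exactly the same unmatched-parenthesis inputs, which Pre_ excludes.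
import Mathlib
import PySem

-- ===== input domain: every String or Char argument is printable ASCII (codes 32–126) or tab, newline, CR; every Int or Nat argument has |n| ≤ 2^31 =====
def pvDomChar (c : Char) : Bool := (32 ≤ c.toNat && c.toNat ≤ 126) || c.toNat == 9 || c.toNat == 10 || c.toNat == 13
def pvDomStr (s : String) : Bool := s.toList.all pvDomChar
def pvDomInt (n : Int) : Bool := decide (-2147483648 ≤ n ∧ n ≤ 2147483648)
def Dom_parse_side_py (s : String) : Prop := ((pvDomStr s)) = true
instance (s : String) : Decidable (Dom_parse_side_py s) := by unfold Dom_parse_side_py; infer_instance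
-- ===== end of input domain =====

-- B replaces A's index loop with find()-jumps by a one-character-at-a-time state machine
-- (alternative decomposition, same cost); both raise on the same unmatched-parenthesis inputs (excluded by Pre_).

-- ===== PORT A =====
-- A's while loop over index i, viewed on the remaining character list: on '(' it takes the
-- characters before the first ')' (s.find) as one group and jumps past it.
def parseSideA : List Char → List (List String)
  | [] => []
  | c :: cs =>
    if c = '(' then
      if ')' ∈ cs then
        ((cs.takeWhile (· ≠ ')')).map (fun ch => String.ofList [ch])) ::
          parseSideA ((cs.dropWhile (· ≠ ')')).tail)
      else []  -- ValueError "Unmatched parenthesis" (excluded by Pre_)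
    else if c = ')' then []  -- ValueError (excluded by Pre_)
    else [String.ofList [c]] :: parseSideA cs
  termination_by cs => cs.length
  decreasing_by
  · have h1 := List.length_dropWhile_le (p := fun ch => decide (ch ≠ ')')) (l := cs)
    have h2 := List.length_tail (l := cs.dropWhile (· ≠ ')'))
    simp at *; omega
  · simp

def parse_side_py (s : String) : List (List String) :=
  parseSideA ((PySem.Str.replace s " " "").toList)

-- ===== PORT B =====
-- B's state: (current open group if inside one, finished groups).
def stepB (st : Option (List String) × List (List String)) (c : Char) :
    Option (List String) × List (List String) :=
  match st with
  | (none, groups) =>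
    if c = '(' then (some [], groups)
    else if c = ')' then (none, groups)  -- ValueError (excluded by Pre_)
    else (none, groups ++ [[String.ofList [c]]])
  | (some cur, groups) =>
    if c = ')' then (none, groups ++ [cur])
    else (some (cur ++ [String.ofList [c]]), groups)

def parse_side_py_alt (s : String) : List (List String) :=
  (((PySem.Str.replace s " " "").toList).foldl stepB (none, [])).2

-- ===== PRECONDITION & SPEC =====
-- Matched-parenthesis shape of one einshape side on the space-stripped string: a sequence of
-- plain characters and flat '(…)' groups (no stray ')', no unterminated '('), checked by a
-- standard inside-a-group flag scan. Exactly on these inputs A (and B) return; on the rest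
-- both raise ValueError ("Unmatched parenthesis").
def validAux : Bool → List Char → Bool
  | false, [] => true
  | true, [] => false
  | false, c :: cs => if c = '(' then validAux true cs else if c = ')' then false else validAux false cs
  | true, c :: cs => if c = ')' then validAux false cs else validAux true cs

def Pre_parse_side_py (s : String) : Prop :=
  validAux false ((PySem.Str.replace s " " "").toList) = true
instance (s : String) : Decidable (Pre_parse_side_py s) := by
  unfold Pre_parse_side_py; infer_instance

def pvWitness_parse_side_py : String := "a(bc)d"

def Spec_parse_side_py (s : String) (out : List (List String)) : Prop := out = parse_side_py_alt s
instance (s : String) (out : List (List String)) : Decidable (Spec_parse_side_py s out) := by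
  unfold Spec_parse_side_py; infer_instance

-- ===== CLAIM (what is proved, stated in full; the proofs are below) =====
def Claim_equal_parse_side_py : Prop :=
  ∀ (s : String), Dom_parse_side_py s → Pre_parse_side_py s →
    Spec_parse_side_py s (parse_side_py s)

-- ===== LEMMAS AND PROOFS =====

theorem dropWhile_struct (cs : List Char) (h : ')' ∈ cs) :
    cs.dropWhile (· ≠ ')') = ')' :: (cs.dropWhile (· ≠ ')')).tail := by
  induction cs with
  | nil => simp at h
  | cons c cs ih =>
    by_cases hc : c = ')'
    · subst hc
      rw [List.dropWhile_cons, if_neg (by simp)]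
      simp
    · rw [List.mem_cons] at h
      have h' : ')' ∈ cs := by tauto
      rw [List.dropWhile_cons, if_pos (by simp [hc])]
      exact ih h'

theorem foldl_inside (pre : List Char) (rest : List Char) :
    ∀ (cur : List String) (groups : List (List String)),
    (∀ c ∈ pre, c ≠ ')') →
    ((pre ++ ')' :: rest).foldl stepB (some cur, groups))
      = rest.foldl stepB (none, groups ++ [cur ++ pre.map (fun ch => String.ofList [ch])]) := by
  induction pre with
  | nil => intro cur groups _; simp [stepB]
  | cons c pre ih =>
    intro cur groups hp
    have hc : c ≠ ')' := hp c (by simp)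
    simp only [List.cons_append, List.foldl_cons, stepB, if_neg hc]
    rw [ih (cur ++ [String.ofList [c]]) groups (fun x hx => hp x (by simp [hx]))]
    simp

theorem mem_of_validAux_true (cs : List Char) (h : validAux true cs = true) : ')' ∈ cs := by
  induction cs with
  | nil => simp [validAux] at h
  | cons c cs ih =>
    by_cases hc : c = ')'
    · simp [hc]
    · simp only [validAux, if_neg hc] at h
      exact List.mem_cons_of_mem _ (ih h)

theorem validAux_inside_split (pre rest : List Char) (hp : ∀ c ∈ pre, c ≠ ')') :
    validAux true (pre ++ ')' :: rest) = validAux false rest := by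
  induction pre with
  | nil => simp [validAux]
  | cons c pre ih =>
    have hc : c ≠ ')' := hp c (by simp)
    simp only [List.cons_append, validAux, if_neg hc]
    exact ih (fun x hx => hp x (by simp [hx]))

theorem foldl_eq_parseSideA_aux (n : Nat) :
    ∀ (cs : List Char), cs.length ≤ n → ∀ groups : List (List String),
    validAux false cs = true →
    (cs.foldl stepB (none, groups)).2 = groups ++ parseSideA cs := by
  induction n with
  | zero =>
    intro cs hlen groups _
    have : cs = [] := List.eq_nil_of_length_eq_zero (Nat.le_zero.mp hlen)
    subst this; simp [parseSideA]
  | succ n ih =>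
    intro cs hlen groups hv
    match cs with
    | [] => simp [parseSideA]
    | c :: cs =>
      by_cases hc1 : c = '('
      · subst hc1
        have hv1 : validAux true cs = true := by simpa [validAux] using hv
        have hmem : ')' ∈ cs := mem_of_validAux_true cs hv1
        have hsplit : cs = cs.takeWhile (· ≠ ')') ++ ')' :: (cs.dropWhile (· ≠ ')')).tail := by
          conv_lhs => rw [← List.takeWhile_append_dropWhile (p := fun ch => decide (ch ≠ ')')) (l := cs),
            dropWhile_struct cs hmem]
        have hpre : ∀ x ∈ cs.takeWhile (· ≠ ')'), x ≠ ')' := by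
          intro x hx
          have := List.mem_takeWhile_imp hx
          simpa using this
        have hv' : validAux false ((cs.dropWhile (· ≠ ')')).tail) = true := by
          rw [hsplit] at hv1
          rwa [validAux_inside_split _ _ hpre] at hv1
        have hlen' : ((cs.dropWhile (· ≠ ')')).tail).length ≤ n := by
          have h1 := List.length_dropWhile_le (p := fun ch => decide (ch ≠ ')')) (l := cs)
          have h2 := List.length_tail (l := cs.dropWhile (· ≠ ')'))
          simp at hlen
          omega
        rw [List.foldl_cons]
        have hstep : stepB (none, groups) '(' = (some [], groups) := by simp [stepB]
        rw [hstep]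
        conv_lhs => rw [hsplit]
        rw [foldl_inside _ _ [] groups hpre]
        rw [ih _ hlen' _ hv']
        rw [parseSideA]
        simp [hmem]
      · by_cases hc2 : c = ')'
        · simp only [validAux, if_neg hc1, if_pos hc2] at hv
          exact absurd hv (by simp)
        · simp only [validAux, if_neg hc1, if_neg hc2] at hv
          have hlen' : cs.length ≤ n := by simp at hlen; omega
          rw [List.foldl_cons]
          have hstep : stepB (none, groups) c = (none, groups ++ [[String.ofList [c]]]) := by
            simp [stepB, hc1, hc2]
          rw [hstep]
          rw [ih _ hlen' _ hv]
          rw [parseSideA]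
          simp [hc1, hc2]

theorem foldl_eq_parseSideA (cs : List Char) (groups : List (List String))
    (h : validAux false cs = true) :
    (cs.foldl stepB (none, groups)).2 = groups ++ parseSideA cs :=
  foldl_eq_parseSideA_aux cs.length cs le_rfl groups h

-- ===== VERDICT (by name: the statement is the Claim_ definition above) =====
theorem parse_side_py_spec : Claim_equal_parse_side_py := by
  intro s _ hpre
  unfold Spec_parse_side_py parse_side_py parse_side_py_alt
  rw [foldl_eq_parseSideA _ [] hpre]
  simp
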